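-- pv_equiv track=rewrite | github.com/Kaushan-Dutta/DSA_PROBLEMS | move_boxes.py | move_boxes
-- ===== SOURCE A (Python) =====
-- def move_boxes(array):
--
--     boxes=[]
--
--     for i in range(len(array)):
--         count=0
--         for j in range(len(array)):
--
--             if(array[j]==1):
--                 count+=abs(i-j)
--         boxes.append(count)
--
--     return boxes
-- ===== SOURCE B (Python) =====
-- def move_boxes(array):
--     # O(n): prefix sweep for boxes to the left, same sweep on the reversed
--     # list for boxes to the right, then add the two per index.
--     def sweep(xs):
--         out = []
--         cnt = 0
--         s = 0
--         for x in xs: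
--             out.append(s)
--             if x == 1:
--                 cnt += 1
--             s += cnt
--         return out
--     left = sweep(array)
--     right = sweep(list(reversed(array)))
--     right.reverse()
--     return [l + r for l, r in zip(left, right)]
-- ===== Notes on version B (the rewrite author's own statement) =====
-- stated objective: faster
-- what changed: Replaced the nested all-pairs distance loop by two linear prefix sweeps (left sweep, and the same sweep on the reversed list) that carry a running box count and distance sum, combined per index.
import Mathlib
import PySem

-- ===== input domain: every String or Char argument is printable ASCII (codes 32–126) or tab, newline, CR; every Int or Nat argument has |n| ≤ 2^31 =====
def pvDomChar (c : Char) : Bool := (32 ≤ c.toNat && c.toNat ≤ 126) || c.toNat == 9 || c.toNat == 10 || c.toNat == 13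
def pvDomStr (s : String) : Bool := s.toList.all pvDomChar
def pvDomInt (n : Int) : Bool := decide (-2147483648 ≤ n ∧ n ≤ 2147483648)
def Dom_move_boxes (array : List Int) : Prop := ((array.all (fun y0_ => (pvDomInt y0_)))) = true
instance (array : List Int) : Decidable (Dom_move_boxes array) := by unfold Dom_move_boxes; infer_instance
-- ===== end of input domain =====

-- B replaces A's quadratic all-pairs distance loop by two linear prefix sweeps
-- (left boxes, then right boxes on the reversed list) added per index.

-- ===== PORT A =====
def move_boxes (array : List Int) : List Int :=
  (PySem.List.pyRange 0 array.length 1).foldl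
    (fun boxes i =>
      boxes ++ [(PySem.List.pyRange 0 array.length 1).foldl
        (fun count j =>
          if PySem.List.pyGetD array j 0 = 1 then count + |i - j| else count) 0])
    []

-- ===== PORT B =====
-- one sweep of Source B's `sweep`: out[i] = sum of (i-j) over earlier ones
def pvSweep (xs : List Int) : List Int :=
  (xs.foldl
    (fun (st : Int × Int × List Int) x =>
      let cnt := if x = 1 then st.1 + 1 else st.1
      (cnt, st.2.1 + cnt, st.2.2 ++ [st.2.1]))
    (0, 0, [])).2.2

def move_boxes_alt (array : List Int) : List Int :=
  let left := pvSweep array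
  let right := (pvSweep array.reverse).reverse
  List.zipWith (· + ·) left right

-- ===== PRECONDITION & SPEC =====
def Spec_move_boxes (array : List Int) (out : List Int) : Prop := out = move_boxes_alt array
instance (array : List Int) (out : List Int) : Decidable (Spec_move_boxes array out) := by unfold Spec_move_boxes; infer_instance

-- ===== CLAIM (what is proved, stated in full; the proofs are below) =====
def Claim_equal_move_boxes : Prop := ∀ (array : List Int), Dom_move_boxes array → Spec_move_boxes array (move_boxes array)

-- ===== LEMMAS AND PROOFS =====

-- distances to the ones strictly left of position i
def pvL (xs : List Int) (i : Nat) : Int :=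
  ∑ j ∈ Finset.range i, if xs.getD j 0 = 1 then (i : Int) - j else 0

-- A's count at index i
def pvA (xs : List Int) (i : Nat) : Int :=
  ∑ j ∈ Finset.range xs.length, if xs.getD j 0 = 1 then |(i : Int) - j| else 0

theorem pvL_zero (xs : List Int) : pvL xs 0 = 0 := by simp [pvL]

theorem pvL_succ (x : Int) (xs : List Int) (i : Nat) :
    pvL (x :: xs) (i + 1) = (if x = 1 then (i : Int) + 1 else 0) + pvL xs i := by
  unfold pvL
  rw [Finset.sum_range_succ']
  simp only [List.getD_cons_succ, List.getD_cons_zero]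
  have h1 : (∑ j ∈ Finset.range i, if xs.getD j 0 = 1 then ((i:Nat) + 1 : Int) - ((j:Nat) + 1 : Int) else 0)
      = ∑ j ∈ Finset.range i, if xs.getD j 0 = 1 then (i : Int) - j else 0 := by
    apply Finset.sum_congr rfl
    intro j _
    split_ifs with h <;> ring
  push_cast
  rw [h1, add_comm]
  split_ifs with h <;> ring

theorem pvSweep_inv (xs : List Int) : ∀ (cnt s : Int) (acc : List Int),
    (xs.foldl
      (fun (st : Int × Int × List Int) x =>
        let c := if x = 1 then st.1 + 1 else st.1
        (c, st.2.1 + c, st.2.2 ++ [st.2.1]))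
      (cnt, s, acc)).2.2
    = acc ++ (List.range xs.length).map (fun i => s + cnt * i + pvL xs i) := by
  induction xs with
  | nil => simp
  | cons x xs ih =>
    intro cnt s acc
    simp only [List.foldl_cons]
    rw [ih]
    rw [List.length_cons, List.range_succ_eq_map, List.map_cons, List.map_map]
    rw [List.append_assoc]
    congr 1
    rw [List.singleton_append]
    congr 1
    · rw [pvL_zero]; push_cast; ring
    · apply List.map_congr_left
      intro i hi
      simp only [Function.comp]
      rw [pvL_succ]
      split_ifs with h <;> push_cast <;> ring

theorem pvSweep_eq (xs : List Int) :
    pvSweep xs = (List.range xs.length).map (fun i => pvL xs i) := by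
  unfold pvSweep
  rw [pvSweep_inv xs 0 0 [], List.nil_append]
  apply List.map_congr_left
  intro i _
  simp

theorem move_boxes_eq (xs : List Int) :
    move_boxes xs = (List.range xs.length).map (fun i => pvA xs i) := by
  unfold move_boxes
  rw [PySem.List.foldl_append_singleton_eq_map, List.nil_append]
  rw [PySem.List.pyRange_zero_nat, List.map_map]
  apply List.map_congr_left
  intro k _
  simp only [Function.comp]
  have hbody : (fun (count j : Int) =>
      if PySem.List.pyGetD xs j 0 = 1 then count + |(k : Int) - j| else count)
      = (fun count j => count + (if PySem.List.pyGetD xs j 0 = 1 then |(k : Int) - j| else 0)) := by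
    funext count j
    split_ifs <;> ring
  rw [hbody, PySem.List.foldl_add, zero_add, List.map_map]
  simp only [Function.comp_def, PySem.List.pyGetD_natCast]
  rfl

theorem pvL_full (xs : List Int) (i : Nat) (h : i ≤ xs.length) :
    pvL xs i = ∑ j ∈ Finset.range xs.length,
      if j < i ∧ xs.getD j 0 = 1 then (i : Int) - j else 0 := by
  have h1 : pvL xs i = ∑ j ∈ Finset.range i,
      if j < i ∧ xs.getD j 0 = 1 then (i : Int) - j else 0 := by
    unfold pvL
    apply Finset.sum_congr rfl
    intro j hj
    rw [Finset.mem_range] at hj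
    by_cases hp : xs.getD j 0 = 1 <;> simp [hj]
  rw [h1]
  exact Finset.sum_subset (by intro x hx; rw [Finset.mem_range] at *; omega)
    (fun j _ hj => if_neg (fun hcon =>
      absurd hcon.1 (by rw [Finset.mem_range, not_lt] at hj; omega)))

theorem pv_getD_reverse (xs : List Int) (j : Nat) (h : j < xs.length) :
    xs.reverse.getD j 0 = xs.getD (xs.length - 1 - j) 0 := by
  rw [List.getD_eq_getElem _ _ (by simpa using h), List.getD_eq_getElem _ _ (by omega),
    List.getElem_reverse]

theorem pv_pointwise (xs : List Int) (i : Nat) (hi : i < xs.length) :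
    pvA xs i = pvL xs i + pvL xs.reverse (xs.length - 1 - i) := by
  rw [pvL_full xs i (le_of_lt hi),
      pvL_full xs.reverse (xs.length - 1 - i) (by rw [List.length_reverse]; omega)]
  rw [List.length_reverse]
  have hR : (∑ j ∈ Finset.range xs.length,
        if j < xs.length - 1 - i ∧ xs.reverse.getD j 0 = 1
        then ((xs.length - 1 - i : Nat) : Int) - j else 0)
      = ∑ j ∈ Finset.range xs.length,
        if i < j ∧ xs.getD j 0 = 1 then (j : Int) - i else 0 := by
    rw [← Finset.sum_range_reflect (fun j => if i < j ∧ xs.getD j 0 = 1 then (j : Int) - i else 0)]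
    apply Finset.sum_congr rfl
    intro j hj
    rw [Finset.mem_range] at hj
    rw [pv_getD_reverse xs j hj]
    by_cases hp : xs.getD (xs.length - 1 - j) 0 = 1
    · by_cases hc : j < xs.length - 1 - i
      · rw [if_pos ⟨hc, hp⟩, if_pos ⟨by omega, hp⟩]; omega
      · rw [if_neg (fun h1 => absurd h1.1 (by omega)),
          if_neg (fun h1 => absurd h1.1 (by omega))]
    · rw [if_neg (fun h2 => hp h2.2), if_neg (fun h2 => hp h2.2)]
  rw [hR, ← Finset.sum_add_distrib]
  unfold pvA
  apply Finset.sum_congr rfl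
  intro j hj
  rw [Finset.mem_range] at hj
  by_cases hp : xs.getD j 0 = 1
  · rcases lt_trichotomy j i with h | h | h
    · rw [if_pos hp, if_pos ⟨h, hp⟩, if_neg (fun h1 => absurd h1.1 (by omega)),
        abs_of_nonneg (by omega : (0:Int) ≤ (i : Int) - j)]
      ring
    · subst h
      rw [if_pos hp, if_neg (fun h1 => absurd h1.1 (by omega))]
      simp
    · rw [if_pos hp, if_neg (fun h1 => absurd h1.1 (by omega)), if_pos ⟨h, hp⟩,
        abs_of_nonpos (by omega : (i : Int) - j ≤ 0)]
      ring
  · rw [if_neg hp, if_neg (fun hc => hp hc.2), if_neg (fun hc => hp hc.2)]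
    simp

theorem pvSweep_length (xs : List Int) : (pvSweep xs).length = xs.length := by
  rw [pvSweep_eq]; simp

-- ===== VERDICT (by name: the statement is the Claim_ definition above) =====
theorem move_boxes_spec : Claim_equal_move_boxes := by
  intro xs _
  unfold Spec_move_boxes move_boxes_alt
  rw [move_boxes_eq]
  apply List.ext_getElem
  · simp [pvSweep_length]
  · intro i h1 h2
    rw [List.getElem_map, List.getElem_range, List.getElem_zipWith, List.getElem_reverse]
    have hi : i < xs.length := by simpa using h1
    rw [List.getElem_of_eq (pvSweep_eq xs), List.getElem_of_eq (pvSweep_eq xs.reverse)]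
    simp only [pvSweep_length, List.length_reverse, List.getElem_map, List.getElem_range]
    exact pv_pointwise xs i hi
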